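-- pv_equiv track=rewrite | github.com/CaptainGG/AISecurityScanner | web_app.py | _suffix_for_name
-- ===== SOURCE A (Python) =====
-- SUPPORTED_CHOICES = [".py", ".json", ".env", ".txt", ".md"]
--
-- def _suffix_for_name(file_name: str) -> str:
--     """Infer scanner suffix from an uploaded filename."""
--     lower_name = file_name.lower()
--     if lower_name == ".env" or lower_name.endswith(".env"):
--         return ".env"
--     for suffix in SUPPORTED_CHOICES:
--         if lower_name.endswith(suffix):
--             return suffix
--     return ""
-- ===== SOURCE B (Python) =====
-- _SUFFIX_TABLE = {'py': '.py', 'json': '.json', 'env': '.env', 'txt': '.txt', 'md': '.md'}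
--
--
-- def _suffix_for_name(file_name: str) -> str:
--     """Infer scanner suffix from an uploaded filename."""
--     lower_name = file_name.lower()
--     if '.' not in lower_name:
--         return ''
--     extension = lower_name.rsplit('.', 1)[-1]
--     return _SUFFIX_TABLE.get(extension, '')
-- ===== Notes on version B (the rewrite author's own statement) =====
-- stated objective: idiomatic
-- what changed: Replaces the per-suffix endswith scan over SUPPORTED_CHOICES (plus a redundant .env special case) with extracting the extension after the final dot once via rsplit and a single dict lookup.
import Mathlib
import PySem

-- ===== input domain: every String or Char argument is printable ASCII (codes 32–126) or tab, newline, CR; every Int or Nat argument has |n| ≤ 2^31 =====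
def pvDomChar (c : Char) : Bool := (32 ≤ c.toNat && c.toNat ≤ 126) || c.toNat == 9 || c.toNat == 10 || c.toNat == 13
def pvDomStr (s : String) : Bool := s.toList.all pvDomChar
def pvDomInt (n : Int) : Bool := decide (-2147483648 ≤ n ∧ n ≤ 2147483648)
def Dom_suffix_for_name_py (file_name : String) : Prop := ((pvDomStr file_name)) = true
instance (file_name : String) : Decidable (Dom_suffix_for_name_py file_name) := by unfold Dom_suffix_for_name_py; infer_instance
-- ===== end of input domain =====

-- B extracts the extension after the last dot once (rsplit('.', 1)[-1]) and looks it up in a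
-- dict, instead of A's per-suffix endswith scan (idiomatic rewrite; same value everywhere).

-- ===== PORT A =====
def pvSupportedChoices : List String := [".py", ".json", ".env", ".txt", ".md"]

-- the 'for suffix in SUPPORTED_CHOICES' loop of A
def pvSuffixLoop (lower_name : String) : List String → String
  | [] => ""
  | suffix :: rest =>
    if PySem.Str.endswith lower_name suffix then suffix else pvSuffixLoop lower_name rest

def suffix_for_name_py (file_name : String) : String :=
  let lower_name := PySem.Str.lower file_name
  if lower_name == ".env" || PySem.Str.endswith lower_name ".env" then ".env"
  else pvSuffixLoop lower_name pvSupportedChoices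

-- ===== PORT B =====
def pvSuffixTable : PySem.Dict String String :=
  PySem.Dict.ofList [("py", ".py"), ("json", ".json"), ("env", ".env"), ("txt", ".txt"), ("md", ".md")]

-- hand port of lower_name.rsplit('.', 1)[-1]: exact when '.' occurs in the list (the only
-- case Source B reaches it) — the segment after the last '.' is the dot-free suffix.
def pvExtAfterLastDot (l : List Char) : List Char :=
  (l.reverse.takeWhile (· ≠ '.')).reverse

def suffix_for_name_py_alt (file_name : String) : String :=
  let lower_name := PySem.Str.lower file_name
  if '.' ∈ lower_name.toList then
    pvSuffixTable.getD (String.ofList (pvExtAfterLastDot lower_name.toList)) ""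
  else ""

-- ===== PRECONDITION & SPEC =====
def Spec_suffix_for_name_py (file_name : String) (out : String) : Prop := out = suffix_for_name_py_alt file_name
instance (file_name : String) (out : String) : Decidable (Spec_suffix_for_name_py file_name out) := by unfold Spec_suffix_for_name_py; infer_instance

-- ===== CLAIM =====
def Claim_equal_suffix_for_name_py : Prop := ∀ (file_name : String), Dom_suffix_for_name_py file_name → Spec_suffix_for_name_py file_name (suffix_for_name_py file_name)

-- ===== LEMMAS AND PROOFS =====

-- core: for a dot-free e, L ends with '.'::e iff '.' occurs in L and the dot-free
-- prefix of L.reverse is e.reverse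
theorem pv_endswith_iff (L e : List Char) (he : '.' ∉ e) :
    ('.' :: e) <:+ L ↔ ('.' ∈ L ∧ L.reverse.takeWhile (· ≠ '.') = e.reverse) := by
  constructor
  · rintro ⟨t, rfl⟩
    constructor
    · simp
    · rw [List.reverse_append, List.reverse_cons, List.append_assoc]
      rw [List.takeWhile_append]
      have hall : ∀ c ∈ e.reverse, (fun c => decide (c ≠ '.')) c = true := by
        intro c hcmem; simp only [List.mem_reverse] at hcmem
        simp; rintro rfl; exact he hcmem
      rw [List.takeWhile_eq_self_iff.mpr hall]
      simp
  · rintro ⟨hmem, htw⟩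
    have hsplit := (List.takeWhile_append_dropWhile (p := fun c => decide (c ≠ '.')) (l := L.reverse)).symm
    have hdw : L.reverse.dropWhile (· ≠ '.') ≠ [] := by
      intro hnil
      have : L.reverse = L.reverse.takeWhile (· ≠ '.') := by
        conv_lhs => rw [hsplit]
        rw [hnil, List.append_nil]
      have hmem' : '.' ∈ L.reverse := by simpa using hmem
      rw [this, htw] at hmem'
      simp only [List.mem_reverse] at hmem'
      exact he hmem'
    obtain ⟨d, ds, hds⟩ := List.exists_cons_of_ne_nil hdw
    have hdhead : d = '.' := by
      have := List.head?_dropWhile_not (p := fun c => decide (c ≠ '.')) (l := L.reverse)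
      rw [hds] at this
      simpa using this
    refine ⟨ds.reverse, ?_⟩
    have : L.reverse = e.reverse ++ '.' :: ds := by
      conv_lhs => rw [hsplit]; rw [htw, hds, hdhead]
    have hL := congrArg List.reverse this
    simpa using hL.symm

theorem ofList_beq (k l : List Char) : (String.ofList k == String.ofList l) = (k == l) := by
  simp [String.ofList_inj]

-- the table lookup misses every key other than the five extensions
theorem pvTable_default (k : List Char) (h1 : k ≠ ['p','y']) (h2 : k ≠ ['j','s','o','n'])
    (h3 : k ≠ ['e','n','v']) (h4 : k ≠ ['t','x','t']) (h5 : k ≠ ['m','d']) :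
    pvSuffixTable.getD (String.ofList k) "" = "" := by
  have e1 : (("py":String) == String.ofList k) = false := by
    rw [show ("py":String) = String.ofList ['p','y'] from rfl, ofList_beq]
    exact beq_eq_false_iff_ne.mpr (fun h => h1 h.symm)
  have e2 : (("json":String) == String.ofList k) = false := by
    rw [show ("json":String) = String.ofList ['j','s','o','n'] from rfl, ofList_beq]
    exact beq_eq_false_iff_ne.mpr (fun h => h2 h.symm)
  have e3 : (("env":String) == String.ofList k) = false := by
    rw [show ("env":String) = String.ofList ['e','n','v'] from rfl, ofList_beq]
    exact beq_eq_false_iff_ne.mpr (fun h => h3 h.symm)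
  have e4 : (("txt":String) == String.ofList k) = false := by
    rw [show ("txt":String) = String.ofList ['t','x','t'] from rfl, ofList_beq]
    exact beq_eq_false_iff_ne.mpr (fun h => h4 h.symm)
  have e5 : (("md":String) == String.ofList k) = false := by
    rw [show ("md":String) = String.ofList ['m','d'] from rfl, ofList_beq]
    exact beq_eq_false_iff_ne.mpr (fun h => h5 h.symm)
  simp [pvSuffixTable, PySem.Dict.ofList, PySem.Dict.getD, PySem.Dict.update, PySem.Dict.empty,
    PySem.Dict.insert, PySem.Dict.get?, e1, e2, e3, e4, e5]

-- the whole equivalence, generalized over the already-lowered string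
theorem pv_main (s : String) :
    (if (s == ".env" || PySem.Str.endswith s ".env") then (".env" : String)
     else pvSuffixLoop s pvSupportedChoices) =
    (if '.' ∈ s.toList then
        pvSuffixTable.getD (String.ofList (pvExtAfterLastDot s.toList)) ""
      else "") := by
  have hor : (s == ".env" || PySem.Str.endswith s ".env") = PySem.Str.endswith s ".env" := by
    cases hb : (s == ".env") with
    | false => simp
    | true =>
      have hs : s = ".env" := by simpa using hb
      subst hs; decide
  rw [hor]
  simp only [pvExtAfterLastDot]
  by_cases hmem : '.' ∈ s.toList
  · have hb : ∀ (ext : List Char), '.' ∉ ext →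
        PySem.Chars.endswith s.toList ('.' :: ext)
          = decide (s.toList.reverse.takeWhile (· ≠ '.') = ext.reverse) := by
      intro ext hx
      by_cases h : s.toList.reverse.takeWhile (· ≠ '.') = ext.reverse
      · simp only [h, decide_true]
        exact (PySem.Chars.endswith_iff _ _).mpr ((pv_endswith_iff _ _ hx).mpr ⟨hmem, h⟩)
      · simp only [h, decide_false]
        exact Bool.eq_false_iff.mpr
          (fun ht => h ((pv_endswith_iff _ _ hx).mp ((PySem.Chars.endswith_iff _ _).mp ht)).2)
    have c1 : PySem.Str.endswith s ".py" = decide (s.toList.reverse.takeWhile (· ≠ '.') = ['y','p']) := by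
      simpa using hb ['p','y'] (by decide)
    have c2 : PySem.Str.endswith s ".json" = decide (s.toList.reverse.takeWhile (· ≠ '.') = ['n','o','s','j']) := by
      simpa using hb ['j','s','o','n'] (by decide)
    have c3 : PySem.Str.endswith s ".env" = decide (s.toList.reverse.takeWhile (· ≠ '.') = ['v','n','e']) := by
      simpa using hb ['e','n','v'] (by decide)
    have c4 : PySem.Str.endswith s ".txt" = decide (s.toList.reverse.takeWhile (· ≠ '.') = ['t','x','t']) := by
      simpa using hb ['t','x','t'] (by decide)
    have c5 : PySem.Str.endswith s ".md" = decide (s.toList.reverse.takeWhile (· ≠ '.') = ['d','m']) := by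
      simpa using hb ['m','d'] (by decide)
    rw [if_pos hmem]
    set e := s.toList.reverse.takeWhile (· ≠ '.') with he
    simp only [pvSuffixLoop, pvSupportedChoices, c1, c2, c3, c4, c5]
    by_cases h3 : e = ['v','n','e']
    · rw [h3]; decide
    by_cases h1 : e = ['y','p']
    · rw [h1]; decide
    by_cases h2 : e = ['n','o','s','j']
    · rw [h2]; decide
    by_cases h4 : e = ['t','x','t']
    · rw [h4]; decide
    by_cases h5 : e = ['d','m']
    · rw [h5]; decide
    simp only [h1, h2, h3, h4, h5, decide_false, Bool.false_eq_true, if_false]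
    exact (pvTable_default e.reverse
      (by simpa using fun h => h1 (by simpa using congrArg List.reverse h))
      (by simpa using fun h => h2 (by simpa using congrArg List.reverse h))
      (by simpa using fun h => h3 (by simpa using congrArg List.reverse h))
      (by simpa using fun h => h4 (by simpa using congrArg List.reverse h))
      (by simpa using fun h => h5 (by simpa using congrArg List.reverse h))).symm
  · have hno : ∀ (ext : List Char), PySem.Chars.endswith s.toList ('.' :: ext) = false := by
      intro ext
      apply Bool.eq_false_iff.mpr
      intro h
      rcases (PySem.Chars.endswith_iff _ _).mp h with ⟨t, ht⟩
      exact hmem (by rw [← ht]; simp)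
    rw [if_neg hmem]
    simp [pvSuffixLoop, pvSupportedChoices, hno]

-- ===== VERDICT =====
theorem suffix_for_name_py_spec : Claim_equal_suffix_for_name_py := by
  intro file_name _
  simp only [Spec_suffix_for_name_py, suffix_for_name_py, suffix_for_name_py_alt]
  exact pv_main (PySem.Str.lower file_name)
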